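-- pv_equiv track=rewrite | github.com/phatakshaunak/scaler_academy | DSA/String_Algorithms/count_A.py | solve
-- ===== SOURCE A (Python) =====
-- def solve(A):
--
--     ans, ct = 0, 0
--
--     N = len(A)
--
--     for i in range(N):
--         if A[i] == 'a':
--             ans = ans + ct + 1
--             ct = ct + 1
--
--     return ans
-- ===== SOURCE B (Python) =====
-- def solve(A):
--     # the k-th 'a' contributes k, so the total is the m-th triangular number
--     m = A.count('a')
--     return m * (m + 1) // 2
-- ===== Notes on version B (the rewrite author's own statement) =====
-- stated objective: faster
-- what changed: Replaces the dual-accumulator loop over every character with a single count of 'a' and the closed-form triangular number m*(m+1)//2.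
import Mathlib
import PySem

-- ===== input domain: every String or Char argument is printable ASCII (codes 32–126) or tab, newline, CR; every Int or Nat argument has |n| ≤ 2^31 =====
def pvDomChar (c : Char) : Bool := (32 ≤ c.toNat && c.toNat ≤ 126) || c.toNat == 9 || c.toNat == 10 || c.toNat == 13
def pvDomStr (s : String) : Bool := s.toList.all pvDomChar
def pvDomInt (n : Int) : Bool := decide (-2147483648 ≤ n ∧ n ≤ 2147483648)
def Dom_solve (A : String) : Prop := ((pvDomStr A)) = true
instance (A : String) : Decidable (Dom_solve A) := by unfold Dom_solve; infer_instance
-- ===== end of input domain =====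

-- B replaces A's running dual-accumulator loop by counting 'a' once and the closed form m*(m+1)//2 (constant-factor speedup).


-- ===== PORT A =====
-- for i in range(N): if A[i] == 'a': ans += ct + 1; ct += 1  (iterating the characters in order)
def solve (A : String) : Int :=
  (A.toList.foldl
    (fun (p : Int × Int) c => if c == 'a' then (p.1 + p.2 + 1, p.2 + 1) else p)
    (0, 0)).1

-- ===== PORT B =====
-- m = A.count('a'); return m * (m + 1) // 2
def solve_alt (A : String) : Int :=
  let m : Int := (PySem.Str.count A "a" : Int)
  PySem.Int.floordiv (m * (m + 1)) 2

-- ===== PRECONDITION & SPEC =====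
def Spec_solve (A : String) (out : Int) : Prop := out = solve_alt A
instance (A : String) (out : Int) : Decidable (Spec_solve A out) := by unfold Spec_solve; infer_instance

-- ===== CLAIM (what is proved, stated in full; the proofs are below) =====
def Claim_equal_solve : Prop := ∀ (A : String), Dom_solve A → Spec_solve A (solve A)

-- ===== LEMMAS AND PROOFS =====

-- triangular number over Nat (proof-only helper)
def pvTri (n : Nat) : Nat := n * (n + 1) / 2

theorem pvTri_succ (n : Nat) : pvTri (n + 1) = pvTri n + (n + 1) := by
  unfold pvTri
  have h : (n + 1) * (n + 1 + 1) = n * (n + 1) + (n + 1) * 2 := by ring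
  rw [h, Nat.add_mul_div_right _ _ (by norm_num : 0 < 2)]

-- PySem.Str.count with a single-character needle is List.count on the characters
theorem count_go_single (c : Char) (l : List Char) (acc : Nat) :
    PySem.Chars.count.go [c] l.length l acc = acc + l.count c := by
  induction l generalizing acc with
  | nil => simp [PySem.Chars.count.go]
  | cons h t ih =>
    by_cases hc : h = c
    · subst hc
      simp [PySem.Chars.count.go, List.isPrefixOf, ih]
      omega
    · simp [PySem.Chars.count.go, List.isPrefixOf, ih, List.count_cons_of_ne hc, Ne.symm hc]

theorem str_count_single (A : String) :
    PySem.Str.count A "a" = A.toList.count 'a' := by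
  have : PySem.Chars.count A.toList ['a'] = A.toList.count 'a' := by
    unfold PySem.Chars.count
    simpa using count_go_single 'a' A.toList 0
  simpa [PySem.Str.count_eq] using this

-- the loop invariant of A: folding from (a, c) adds c·m + tri m to ans and m to ct
theorem loopA (l : List Char) (a c : Int) :
    l.foldl (fun (p : Int × Int) ch => if ch == 'a' then (p.1 + p.2 + 1, p.2 + 1) else p) (a, c)
      = (a + c * (l.count 'a' : Int) + (pvTri (l.count 'a') : Int), c + (l.count 'a' : Int)) := by
  induction l generalizing a c with
  | nil => simp [pvTri]
  | cons h t ih =>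
    by_cases hc : h = 'a'
    · subst hc
      simp only [List.foldl_cons, if_pos (by decide : ('a' == 'a') = true), ih,
        List.count_cons_self, pvTri_succ, Prod.mk.injEq]
      constructor <;> (push_cast; ring)
    · have hb : (h == 'a') = false := by
        exact beq_false_of_ne hc
      simp only [List.foldl_cons, hb, Bool.false_eq_true, if_false, ih]
      rw [List.count_cons_of_ne hc]

theorem solve_eq (A : String) : solve A = solve_alt A := by
  unfold solve solve_alt
  rw [loopA, str_count_single]
  rw [PySem.Int.floordiv_eq_ediv_of_pos (by norm_num)]
  rw [show ((A.toList.count 'a' : Int) * ((A.toList.count 'a' : Int) + 1))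
      = ((A.toList.count 'a' * (A.toList.count 'a' + 1) : Nat) : Int) by push_cast; ring]
  rw [show ((2 : Int)) = ((2 : Nat) : Int) by norm_num, ← Int.natCast_div]
  unfold pvTri
  simp

-- ===== VERDICT (by name: the statement is the Claim_ definition above) =====
theorem solve_spec : Claim_equal_solve := by
  intro A _
  exact solve_eq A
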